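-- pv_equiv track=rewrite | github.com/JonSteinn/Kattis-Solutions | src/Mancala/Python 3/main.py | find_board
-- ===== SOURCE A (Python) =====
-- import heapq
--
-- def find_board(n):
--     board = [n] # includes Ruma
--     zeros = []
--     while board[0] > 0:
--         if not zeros:
--             for i in range(len(board) - 1, -1, -1):
--                 board[i] -= 1
--                  # The Ruma shouldn't be placed here but since
--                  # it would break the loop, it doesn't matter
--                 if board[i] == 0:
--                     heapq.heappush(zeros, i)
--             board.append(len(board))
--         else:
--             next_empty = heapq.heappop(zeros)
--             board[next_empty] = next_empty
--             for i in range(next_empty - 1, -1, -1):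
--                 board[i] -= 1
--                 if board[i] == 0:
--                     heapq.heappush(zeros, i)
--
--     return board
-- ===== SOURCE B (Python) =====
-- def find_board(n):
--     board = [n]
--     while board[0] > 0:
--         j = next((i for i, v in enumerate(board) if v == 0), None)
--         if j is None:
--             board = [v - 1 for v in board]
--             board.append(len(board))
--         else:
--             board[:j] = [v - 1 for v in board[:j]]
--             board[j] = j
--     return board
-- ===== Notes on version B (the rewrite author's own statement) =====
-- stated objective: simpler
-- what changed: B drops A's heap and in-place index mutation entirely: each iteration finds the least empty pit by a single forward scan and rebuilds the board functionally from slices, instead of maintaining a heapq of zero positions and mutating entries with reverse index loops.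
import Mathlib
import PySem

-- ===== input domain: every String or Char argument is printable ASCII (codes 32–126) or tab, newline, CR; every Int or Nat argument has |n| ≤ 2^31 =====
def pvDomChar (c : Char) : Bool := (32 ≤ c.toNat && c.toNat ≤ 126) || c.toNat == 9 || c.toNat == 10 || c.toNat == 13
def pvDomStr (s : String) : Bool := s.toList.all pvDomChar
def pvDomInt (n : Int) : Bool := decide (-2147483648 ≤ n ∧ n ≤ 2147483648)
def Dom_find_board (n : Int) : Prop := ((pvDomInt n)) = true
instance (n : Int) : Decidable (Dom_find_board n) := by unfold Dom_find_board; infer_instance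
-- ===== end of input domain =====

-- B replaces A's heapq of empty pits and in-place reverse index loops by a forward scan
-- for the least empty pit and a functional rebuild from slices (objective: simpler; not faster).

-- ===== PORT A =====
-- A's heap 'zeros' holds DISTINCT nonnegative indices; heapq's observable behaviour on
-- distinct integers (heappop returns the minimum) is ported exactly by a sorted list:
-- heappush = ordered insert, heappop = (head, tail).
def heapPush : List Nat → Nat → List Nat
  | [], x => [x]
  | y :: t, x => if x ≤ y then x :: y :: t else y :: heapPush t x

-- one step of A's 'board[i] -= 1; if board[i] == 0: heappush(zeros, i)'
-- (board.getD i 0: every index A touches is in range, so getD equals Python's board[i])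
def fbStep (i : Nat) (s : List Int × List Nat) : List Int × List Nat :=
  (s.1.set i (s.1.getD i 0 - 1),
   if s.1.getD i 0 - 1 = 0 then heapPush s.2 i else s.2)

-- A's 'for i in range(k-1, -1, -1)' loop: body applied at k-1, …, 0 (in that order)
def fbPass : Nat → List Int × List Nat → List Int × List Nat
  | 0, s => s
  | k+1, s => fbPass k (fbStep k s)

-- board after a pass (cited by the termination proofs of the loop below)
theorem fbPass_board (k : Nat) : ∀ (b : List Int) (z : List Nat),
    (fbPass k (b, z)).1 = (b.take k).map (· - 1) ++ b.drop k := by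
  induction k with
  | zero => intro b z; simp [fbPass]
  | succ k ih =>
    intro b z
    show (fbPass k (fbStep k (b, z))).1 = _
    simp only [fbStep]
    rcases lt_or_ge k b.length with h | h
    · rw [ih]
      have ht : (b.set k (b.getD k 0 - 1)).take k = b.take k := by
        rw [List.take_set, List.set_eq_of_length_le (by simp [List.length_take])]
      have hd : (b.set k (b.getD k 0 - 1)).drop k = (b.getD k 0 - 1) :: b.drop (k+1) := by
        rw [List.drop_set, if_neg (lt_irrefl k)]
        simp only [Nat.sub_self]
        rw [List.drop_eq_getElem_cons h, List.set_cons_zero]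
      rw [ht, hd]
      have hgd : b.getD k 0 = b[k] := by
        simp [List.getD_eq_getElem?_getD, List.getElem?_eq_getElem h]
      have htk : List.take (k+1) b = List.take k b ++ [b[k]] := by
        rw [List.take_succ, List.getElem?_eq_getElem h]
        rfl
      rw [hgd, htk, List.map_append]
      simp
    · rw [List.set_eq_of_length_le (by omega), ih,
          List.take_of_length_le (by omega), List.take_of_length_le (by omega),
          List.drop_eq_nil_of_le (by omega : b.length ≤ k),
          List.drop_eq_nil_of_le (by omega : b.length ≤ k + 1)]

theorem fbPass_length (k : Nat) (b : List Int) (z : List Nat) :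
    (fbPass k (b, z)).1.length = b.length := by
  rw [fbPass_board]
  simp [List.length_take]
  omega

theorem fbPass_headD (k : Nat) (b : List Int) (z : List Nat)
    (h1 : 1 ≤ k) (h2 : b ≠ []) :
    (fbPass k (b, z)).1.headD 0 = b.headD 0 - 1 := by
  rw [fbPass_board]
  rcases b with _ | ⟨x, t⟩
  · exact absurd rfl h2
  · rcases k with _ | k
    · omega
    · simp [List.take_succ_cons]

-- A's main 'while board[0] > 0' loop over the state (board, zeros)
def fbLoopA (b : List Int) (z : List Nat) : List Int :=
  if h : 0 < b.headD 0 then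
    match z with
    | [] =>
      -- no empty pit: decrement every pit (pushing fresh zeros), then board.append(len(board))
      let s := fbPass b.length (b, [])
      fbLoopA (s.1 ++ [(s.1.length : Int)]) s.2
    | j :: z0 =>
      -- next_empty = heappop(zeros); board[next_empty] = next_empty; decrement below it
      let s := fbPass j (b.set j (j : Int), z0)
      fbLoopA s.1 s.2
  else b
termination_by (b.headD 0).toNat
decreasing_by
  · have hb : b ≠ [] := by rintro rfl; simp at h
    have hl : 1 ≤ b.length := List.length_pos_iff.mpr hb
    have hne : (fbPass b.length (b, ([] : List Nat))).1 ≠ [] := by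
      intro hc
      have := fbPass_length b.length b []
      rw [hc] at this
      simp at this
      omega
    rw [List.headD_eq_head?, List.head?_append_of_ne_nil _ hne, ← List.headD_eq_head?,
        fbPass_headD _ _ _ hl hb]
    omega
  · have hb : b ≠ [] := by rintro rfl; simp at h
    rcases Nat.eq_zero_or_pos j with hj | hj
    · subst hj
      simp only [fbPass]
      rcases b with _ | ⟨x, t⟩
      · exact absurd rfl hb
      · simp at h ⊢
        omega
    · have hb' : b.set j (j : Int) ≠ [] := by
        intro hc
        have := congrArg List.length hc
        simp at this
        exact hb this
      rw [fbPass_headD _ _ _ hj hb']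
      have hsame : (b.set j (j : Int)).headD 0 = b.headD 0 := by
        rcases b with _ | ⟨x, t⟩
        · rfl
        · rcases j with _ | j
          · omega
          · rfl
      rw [hsame]
      omega

def find_board (n : Int) : List Int := fbLoopA [n] []

-- ===== PORT B =====
def fbLoopB (b : List Int) : List Int :=
  if h : 0 < b.headD 0 then
    match hf : b.findIdx? (· == 0) with
    | none => fbLoopB (b.map (· - 1) ++ [(b.length : Int)])
    | some j => fbLoopB ((b.take j).map (· - 1) ++ (j : Int) :: b.drop (j + 1))
  else b
termination_by (b.headD 0).toNat
decreasing_by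
  · have hb : b ≠ [] := by rintro rfl; simp at h
    rcases b with _ | ⟨x, t⟩
    · exact absurd rfl hb
    · simp at h ⊢
      omega
  · have hb : b ≠ [] := by rintro rfl; simp at h
    rcases b with _ | ⟨x, t⟩
    · exact absurd rfl hb
    · simp only [List.headD_cons] at h
      obtain ⟨hjl, hje⟩ := List.findIdx?_eq_some_iff_findIdx_eq.mp hf
      rw [List.findIdx_cons] at hje
      have hx : (x == (0 : Int)) = false := by simp; omega
      rw [hx] at hje
      simp at hje
      rcases j with _ | j
      · omega
      · simp [List.take_succ_cons] at *
        omega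

def find_board_alt (n : Int) : List Int := fbLoopB [n]

-- ===== PRECONDITION & SPEC =====
def Spec_find_board (n : Int) (out : List Int) : Prop := out = find_board_alt n
instance (n : Int) (out : List Int) : Decidable (Spec_find_board n out) := by unfold Spec_find_board; infer_instance

-- ===== CLAIM (what is proved, stated in full; the proofs are below) =====
def Claim_equal_find_board : Prop := ∀ (n : Int), Dom_find_board n → Spec_find_board n (find_board n)

-- ===== LEMMAS AND PROOFS =====

-- the ascending list of indices holding 0 (A's heap content, B's scan targets)
def zeroIdxs (b : List Int) : List Nat :=
  (List.range b.length).filter (fun i => b.getD i 0 == 0)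

theorem heapPush_cons (z : List Nat) (x : Nat) (h : ∀ y ∈ z, x ≤ y) :
    heapPush z x = x :: z := by
  cases z with
  | nil => rfl
  | cons y t => simp [heapPush, h y (by simp)]

theorem fbPass_zeros (k : Nat) : ∀ (b : List Int) (z : List Nat),
    (∀ y ∈ z, k ≤ y) →
    (fbPass k (b, z)).2
      = ((List.range k).filter (fun i => b.getD i 0 == 1)) ++ z := by
  induction k with
  | zero => intro b z h; simp [fbPass]
  | succ k ih =>
    intro b z h
    show (fbPass k (fbStep k (b, z))).2 = _
    simp only [fbStep]
    have hstep : ∀ y ∈ (if b.getD k 0 - 1 = 0 then heapPush z k else z), k ≤ y := by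
      split
      · rw [heapPush_cons z k (fun y hy => Nat.le_of_lt (h y hy))]
        intro y hy
        rcases List.mem_cons.mp hy with rfl | hy
        · exact Nat.le_refl _
        · exact Nat.le_of_lt (h y hy)
      · exact fun y hy => Nat.le_of_lt (h y hy)
    rw [ih _ _ hstep]
    have hfil : (List.range k).filter
          (fun i => (b.set k (b.getD k 0 - 1)).getD i 0 == 1)
        = (List.range k).filter (fun i => b.getD i 0 == 1) := by
      apply List.filter_congr
      intro i hi
      have hik : k ≠ i := by have := List.mem_range.mp hi; omega
      simp only [List.getD_eq_getElem?_getD, List.getElem?_set_ne hik]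
    rw [hfil, List.range_succ, List.filter_append]
    by_cases hv : b.getD k 0 = 1
    · rw [if_pos (by omega), heapPush_cons z k (fun y hy => Nat.le_of_lt (h y hy))]
      have htrue : ((b[k]?.getD 0 : Int) == 1) = true := by
        rw [beq_iff_eq, ← List.getD_eq_getElem?_getD]
        exact hv
      simp [List.filter, htrue]
    · rw [if_neg (by omega : ¬ (b.getD k 0 - 1 = 0))]
      have hne1 : (b[k]?.getD 0 : Int) ≠ 1 := by
        rw [← List.getD_eq_getElem?_getD]
        exact hv
      have hfalse : ((b[k]?.getD 0 : Int) == 1) = false := beq_eq_false_iff_ne.mpr hne1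
      simp [List.filter, hfalse]

theorem mem_zeroIdxs (b : List Int) (i : Nat) :
    i ∈ zeroIdxs b ↔ i < b.length ∧ b.getD i 0 = 0 := by
  unfold zeroIdxs
  rw [List.mem_filter, List.mem_range]
  simp

theorem zeroIdxs_nil_iff (b : List Int) :
    zeroIdxs b = [] ↔ b.findIdx? (· == 0) = none := by
  rw [List.findIdx?_eq_none_iff]
  unfold zeroIdxs
  rw [List.filter_eq_nil_iff]
  constructor
  · intro h x hx
    rcases List.getElem_of_mem hx with ⟨i, hi, rfl⟩
    have := h i (List.mem_range.mpr hi)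
    simpa [List.getD_eq_getElem?_getD, List.getElem?_eq_getElem hi] using this
  · intro h i hi
    have hi' := List.mem_range.mp hi
    have := h b[i] (List.getElem_mem hi')
    simpa [List.getD_eq_getElem?_getD, List.getElem?_eq_getElem hi'] using this

theorem zeroIdxs_cons_facts (b : List Int) (j : Nat) (z0 : List Nat)
    (h : zeroIdxs b = j :: z0) :
    j < b.length ∧ b.getD j 0 = 0 ∧ (∀ i < j, b.getD i 0 ≠ 0) ∧ (∀ y ∈ z0, j < y) := by
  have hs : (zeroIdxs b).Pairwise (· < ·) :=
    List.Pairwise.filter _ List.pairwise_lt_range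
  rw [h] at hs
  have hgt := (List.pairwise_cons.mp hs).1
  have hj : j ∈ zeroIdxs b := by rw [h]; simp
  obtain ⟨hjl, hjz⟩ := (mem_zeroIdxs b j).mp hj
  refine ⟨hjl, hjz, ?_, hgt⟩
  intro i hij hiz
  have hi : i ∈ zeroIdxs b := (mem_zeroIdxs b i).mpr ⟨by omega, hiz⟩
  rw [h] at hi
  rcases List.mem_cons.mp hi with rfl | hi
  · omega
  · have := hgt i hi
    omega

theorem zeroIdxs_cons_findIdx (b : List Int) (j : Nat) (z0 : List Nat)
    (h : zeroIdxs b = j :: z0) : b.findIdx? (· == 0) = some j := by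
  obtain ⟨hjl, hjz, hmin, -⟩ := zeroIdxs_cons_facts b j z0 h
  rw [List.findIdx?_eq_some_iff_findIdx_eq]
  refine ⟨hjl, ?_⟩
  have hj0 : b[j] = (0 : Int) := by
    have := hjz
    simpa [List.getD_eq_getElem?_getD, List.getElem?_eq_getElem hjl] using this
  have hle : ¬ (j < b.findIdx (· == 0)) := by
    intro hlt
    obtain ⟨hlen', hall⟩ := (List.lt_findIdx_iff b (· == 0) j).mp hlt
    have := hall j (le_refl j)
    simp [hj0] at this
  have hge : ¬ (b.findIdx (· == 0) < j) := by
    intro hlt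
    have hw : b.findIdx (· == 0) < b.length := by omega
    have := List.findIdx_getElem (w := hw)
    have hz : b.getD (b.findIdx (· == 0)) 0 = 0 := by
      simpa [List.getD_eq_getElem?_getD, List.getElem?_eq_getElem hw] using this
    exact hmin _ hlt hz
  omega

theorem zeroIdxs_append (u v : List Int) :
    zeroIdxs (u ++ v) = zeroIdxs u ++ (zeroIdxs v).map (u.length + ·) := by
  unfold zeroIdxs
  rw [List.length_append, List.range_add, List.filter_append, List.filter_map]
  congr 1
  · apply List.filter_congr
    intro i hi
    have hi' := List.mem_range.mp hi
    simp only [List.getD_eq_getElem?_getD, List.getElem?_append_left hi']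
  · congr 1
    apply List.filter_congr
    intro i hi
    simp only [Function.comp_apply, List.getD_eq_getElem?_getD,
      List.getElem?_append_right (Nat.le_add_right u.length i), Nat.add_sub_cancel_left]

theorem zeroIdxs_map_sub (b : List Int) :
    zeroIdxs (b.map (· - 1)) = (List.range b.length).filter (fun i => b.getD i 0 == 1) := by
  unfold zeroIdxs
  rw [List.length_map]
  apply List.filter_congr
  intro i hi
  have hi' := List.mem_range.mp hi
  rw [Bool.eq_iff_iff]
  simp only [List.getD_eq_getElem?_getD, List.getElem?_map,
    List.getElem?_eq_getElem hi', Option.map_some, Option.getD_some, beq_iff_eq]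
  omega

theorem zeroIdxs_singleton_ne (x : Int) (hx : x ≠ 0) : zeroIdxs [x] = [] := by
  unfold zeroIdxs
  simp [List.filter, hx]

theorem zeroIdxs_decApp (b : List Int) (hb : 1 ≤ b.length) :
    zeroIdxs (b.map (· - 1) ++ [(b.length : Int)])
      = (List.range b.length).filter (fun i => b.getD i 0 == 1) := by
  rw [zeroIdxs_append, zeroIdxs_map_sub,
      zeroIdxs_singleton_ne _ (by omega)]
  simp

theorem zeroIdxs_splice (b : List Int) (j : Nat) (z0 : List Nat)
    (hjl : j < b.length) (hj1 : 1 ≤ j) (hcons : zeroIdxs b = j :: z0) :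
    zeroIdxs ((b.take j).map (· - 1) ++ (j : Int) :: b.drop (j + 1))
      = (List.range j).filter (fun i => b.getD i 0 == 1) ++ z0 := by
  obtain ⟨-, hjz, hmin, -⟩ := zeroIdxs_cons_facts b j z0 hcons
  have hU : zeroIdxs ((b.take j).map (· - 1))
      = (List.range j).filter (fun i => b.getD i 0 == 1) := by
    rw [zeroIdxs_map_sub, List.length_take, Nat.min_eq_left (le_of_lt hjl)]
    apply List.filter_congr
    intro i hi
    have hi' := List.mem_range.mp hi
    simp only [List.getD_eq_getElem?_getD, List.getElem?_take, if_pos hi']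
  have hlen : ((b.take j).map (· - 1)).length = j := by
    simp [List.length_take]
    omega
  have hcsplit : (j : Int) :: b.drop (j + 1) = [(j : Int)] ++ b.drop (j + 1) := rfl
  rw [hcsplit, zeroIdxs_append, zeroIdxs_append,
      zeroIdxs_singleton_ne _ (by omega), hU, hlen]
  simp only [List.nil_append, List.map_map, List.length_cons, List.length_nil]
  congr 1
  -- identify z0 with the shifted zero indices of b.drop (j+1)
  have hsplit : zeroIdxs b
      = zeroIdxs (b.take (j + 1))
        ++ (zeroIdxs (b.drop (j + 1))).map ((b.take (j + 1)).length + ·) := by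
    conv_lhs => rw [← List.take_append_drop (j + 1) b]
    rw [zeroIdxs_append]
  have hlen2 : (b.take (j + 1)).length = j + 1 := by
    simp [List.length_take]
    omega
  have hpre : zeroIdxs (b.take (j + 1)) = [j] := by
    unfold zeroIdxs
    rw [hlen2, List.range_succ, List.filter_append]
    have h1 : (List.range j).filter (fun i => (b.take (j + 1)).getD i 0 == 0) = [] := by
      rw [List.filter_eq_nil_iff]
      intro i hi
      have hi' := List.mem_range.mp hi
      have hEq : (List.take (j + 1) b)[i]?.getD 0 = b.getD i 0 := by
        rw [List.getElem?_take, if_pos (by omega : i < j + 1), List.getD_eq_getElem?_getD]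
      simp [hEq]
      exact hmin i hi'
    have h2 : [j].filter (fun i => (b.take (j + 1)).getD i 0 == 0) = [j] := by
      have hb2 : (b[j]?.getD 0 : Int) = 0 := by
        rw [← List.getD_eq_getElem?_getD]
        exact hjz
      simp [List.filter, hb2]
    rw [h1, h2, List.nil_append]
  rw [hpre, hlen2, hcons] at hsplit
  have hz0 : z0 = (zeroIdxs (b.drop (j + 1))).map ((j + 1) + ·) := by
    simpa using hsplit
  rw [hz0]
  apply List.map_congr_left
  intro a ha
  simp only [Function.comp_apply]
  omega

-- unfolding lemmas for the two loops
theorem fbLoopA_stop (b : List Int) (z : List Nat) (hg : ¬ 0 < b.headD 0) :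
    fbLoopA b z = b := by
  rw [fbLoopA.eq_def, dif_neg hg]

theorem fbLoopA_nil (b : List Int) (hg : 0 < b.headD 0) :
    fbLoopA b []
      = fbLoopA ((fbPass b.length (b, [])).1 ++ [((fbPass b.length (b, [])).1.length : Int)])
          (fbPass b.length (b, [])).2 := by
  rw [fbLoopA.eq_def, dif_pos hg]

theorem fbLoopA_cons (b : List Int) (j : Nat) (z0 : List Nat) (hg : 0 < b.headD 0) :
    fbLoopA b (j :: z0)
      = fbLoopA (fbPass j (b.set j (j : Int), z0)).1 (fbPass j (b.set j (j : Int), z0)).2 := by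
  rw [fbLoopA.eq_def, dif_pos hg]

theorem fbLoopB_stop (b : List Int) (hg : ¬ 0 < b.headD 0) :
    fbLoopB b = b := by
  rw [fbLoopB.eq_def, dif_neg hg]

theorem fbLoopB_none (b : List Int) (hg : 0 < b.headD 0)
    (hf : b.findIdx? (· == 0) = none) :
    fbLoopB b = fbLoopB (b.map (· - 1) ++ [(b.length : Int)]) := by
  rw [fbLoopB.eq_def, dif_pos hg]
  split
  · rfl
  · rename_i j heq
    rw [hf] at heq
    exact absurd heq (by simp)

theorem fbLoopB_some (b : List Int) (j : Nat) (hg : 0 < b.headD 0)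
    (hf : b.findIdx? (· == 0) = some j) :
    fbLoopB b = fbLoopB ((b.take j).map (· - 1) ++ (j : Int) :: b.drop (j + 1)) := by
  rw [fbLoopB.eq_def, dif_pos hg]
  split
  · rename_i heq
    rw [hf] at heq
    exact absurd heq (by simp)
  · rename_i j' heq
    rw [hf] at heq
    cases heq
    rfl

theorem loopAB (N : Nat) : ∀ (b : List Int) (z : List Nat),
    (b.headD 0).toNat ≤ N → z = zeroIdxs b → fbLoopA b z = fbLoopB b := by
  induction N with
  | zero =>
    intro b z hN hz
    have hg : ¬ 0 < b.headD 0 := by omega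
    rw [fbLoopA_stop _ _ hg, fbLoopB_stop _ hg]
  | succ N ih =>
    intro b z hN hz
    by_cases hg : 0 < b.headD 0
    · have hb : b ≠ [] := by rintro rfl; simp at hg
      have hb0 : b.getD 0 0 = b.headD 0 := by
        rcases b with _ | ⟨x, t⟩
        · rfl
        · rfl
      subst hz
      rcases hzc : zeroIdxs b with _ | ⟨j, z0⟩
      · -- no empty pit: full decrement + append on both sides
        have hfi : b.findIdx? (· == 0) = none := (zeroIdxs_nil_iff b).mp hzc
        have hl : 1 ≤ b.length := List.length_pos_iff.mpr hb
        rw [fbLoopA_nil b hg, fbLoopB_none b hg hfi]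
        have hpb : (fbPass b.length (b, ([] : List Nat))).1 = b.map (· - 1) := by
          rw [fbPass_board, List.take_of_length_le (le_refl _), List.drop_length,
              List.append_nil]
        have hpz : (fbPass b.length (b, ([] : List Nat))).2
            = (List.range b.length).filter (fun i => b.getD i 0 == 1) := by
          rw [fbPass_zeros _ _ _ (by simp), List.append_nil]
        rw [hpb, hpz]
        have hlm : ((b.map (· - 1)).length : Int) = (b.length : Int) := by
          simp
        rw [hlm]
        apply ih
        · have hh : (b.map (· - 1) ++ [(b.length : Int)]).headD 0 = b.headD 0 - 1 := by
            rcases b with _ | ⟨x, t⟩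
            · exact absurd rfl hb
            · rfl
          rw [hh]
          omega
        · exact (zeroIdxs_decApp b hl).symm
      · -- pop the least empty pit
        obtain ⟨hjl, hjz, hmin, hgt⟩ := zeroIdxs_cons_facts b j z0 hzc
        have hj1 : 1 ≤ j := by
          rcases Nat.eq_zero_or_pos j with rfl | hj
          · rw [hb0] at hjz
            omega
          · exact hj
        have hfi : b.findIdx? (· == 0) = some j := zeroIdxs_cons_findIdx b j z0 hzc
        rw [fbLoopA_cons b j z0 hg, fbLoopB_some b j hg hfi]
        have hsb : (fbPass j (b.set j (j : Int), z0)).1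
            = (b.take j).map (· - 1) ++ (j : Int) :: b.drop (j + 1) := by
          rw [fbPass_board]
          have ht : (b.set j (j : Int)).take j = b.take j := by
            rw [List.take_set, List.set_eq_of_length_le (by simp [List.length_take])]
          have hd : (b.set j (j : Int)).drop j = (j : Int) :: b.drop (j + 1) := by
            rw [List.drop_set, if_neg (lt_irrefl j)]
            simp only [Nat.sub_self]
            rw [List.drop_eq_getElem_cons hjl, List.set_cons_zero]
          rw [ht, hd]
        have hsz : (fbPass j (b.set j (j : Int), z0)).2
            = (List.range j).filter (fun i => b.getD i 0 == 1) ++ z0 := by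
          rw [fbPass_zeros _ _ _ (fun y hy => Nat.le_of_lt (hgt y hy))]
          congr 1
          apply List.filter_congr
          intro i hi
          have hi' := List.mem_range.mp hi
          simp only [List.getD_eq_getElem?_getD, List.getElem?_set_ne (by omega : j ≠ i)]
        rw [hsb, hsz]
        apply ih
        · have hh : ((b.take j).map (· - 1) ++ (j : Int) :: b.drop (j + 1)).headD 0
              = b.headD 0 - 1 := by
            rcases b with _ | ⟨x, t⟩
            · exact absurd rfl hb
            · rcases j with _ | j
              · omega
              · simp [List.take_succ_cons]
          rw [hh]
          omega
        · exact (zeroIdxs_splice b j z0 hjl hj1 hzc).symm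
    · rw [fbLoopA_stop _ _ hg, fbLoopB_stop _ hg]

-- ===== VERDICT (by name: the statement is the Claim_ definition above) =====
theorem find_board_spec : Claim_equal_find_board := by
  unfold Claim_equal_find_board Spec_find_board find_board find_board_alt
  intro n _
  by_cases hn : n = 0
  · subst hn
    rw [fbLoopA_stop _ _ (by simp), fbLoopB_stop _ (by simp)]
  · apply loopAB (([n] : List Int).headD 0).toNat _ _ (le_refl _)
    unfold zeroIdxs
    simp [List.filter, hn]
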